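-- pv_equiv track=rewrite | github.com/thals7/Programmers | Level2/짝지어 제거하기.py | solution
-- ===== SOURCE A (Python) =====
-- def solution(s):
--     stack = []
--     for i in range(len(s)):
--         if not stack:
--             stack.append(s[i])
--         elif stack[-1] == s[i]:
--             stack.pop()
--         else:
--             stack.append(s[i])
--     return 1 if stack else 0
-- ===== SOURCE B (Python) =====
-- def solution(s):
--     chars = list(s)
--     i = 0
--     while i + 1 < len(chars):
--         if chars[i] == chars[i + 1]:
--             del chars[i:i + 2]
--             i = max(i - 1, 0)
--         else:
--             i += 1
--     return 1 if chars else 0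
-- ===== Notes on version B (the rewrite author's own statement) =====
-- stated objective: alternative
-- what changed: Replaces the stack fold with an in-place scan over a char list that deletes the first adjacent equal pair and steps back one position, repeating until no adjacent pair remains (relies on confluence of pair removal).
import Mathlib
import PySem

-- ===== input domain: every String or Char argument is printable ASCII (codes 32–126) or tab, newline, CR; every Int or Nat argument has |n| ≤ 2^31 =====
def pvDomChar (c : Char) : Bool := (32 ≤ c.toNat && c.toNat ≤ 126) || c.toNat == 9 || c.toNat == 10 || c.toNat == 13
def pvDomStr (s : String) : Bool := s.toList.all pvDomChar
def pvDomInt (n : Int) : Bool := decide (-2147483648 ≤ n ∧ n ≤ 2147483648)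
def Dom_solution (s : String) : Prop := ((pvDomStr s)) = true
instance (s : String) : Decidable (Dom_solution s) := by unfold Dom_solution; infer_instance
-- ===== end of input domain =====

-- B replaces A's one-pass stack with a repeated scan deleting adjacent equal pairs in place;
-- same return value (alternative decomposition, not faster).

-- ===== PORT A =====
-- A: fold over the characters maintaining a stack (append/pop at the end, as in the Python).
def solution (s : String) : Int :=
  let stack := s.toList.foldl (fun stack c =>
    if stack = [] then stack ++ [c]
    else if stack.getLast? = some c then stack.dropLast
    else stack ++ [c]) ([] : List Char)
  if stack ≠ [] then 1 else 0

-- ===== PORT B =====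
-- B's loop: scan index i; on chars[i] == chars[i+1] delete that pair (del chars[i:i+2])
-- and step back one (max(i-1,0) = Nat i-1), else advance.
def solutionAltLoop (chars : List Char) (i : Nat) : List Char :=
  if h : i + 1 < chars.length then
    if chars[i] = chars[i + 1] then
      solutionAltLoop (chars.take i ++ chars.drop (i + 2)) (i - 1)
    else
      solutionAltLoop chars (i + 1)
  else chars
termination_by 2 * chars.length + (chars.length - i)
decreasing_by
  · simp [List.length_take, List.length_drop]
    omega
  · omega

def solution_alt (s : String) : Int :=
  if solutionAltLoop s.toList 0 ≠ [] then 1 else 0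

-- ===== PRECONDITION & SPEC =====
def Spec_solution (s : String) (out : Int) : Prop := out = solution_alt s
instance (s : String) (out : Int) : Decidable (Spec_solution s out) := by unfold Spec_solution; infer_instance

-- ===== CLAIM (what is proved, stated in full; the proofs are below) =====
def Claim_equal_solution : Prop := ∀ (s : String), Dom_solution s → Spec_solution s (solution s)

-- ===== LEMMAS AND PROOFS =====

-- The stack step, on a reversed stack (push/pop at the head).
def rstep (st : List Char) (c : Char) : List Char :=
  if st.head? = some c then st.tail else c :: st

-- A's fold (stack kept with its end last, as in the Python) equals the reversed rstep-fold.
theorem foldA_eq_rstep (l : List Char) : ∀ (rv : List Char),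
    l.foldl (fun stack c =>
      if stack = [] then stack ++ [c]
      else if stack.getLast? = some c then stack.dropLast
      else stack ++ [c]) rv.reverse = (l.foldl rstep rv).reverse := by
  induction l with
  | nil => intro rv; rfl
  | cons c t ih =>
    intro rv
    have hstep : (if rv.reverse = [] then rv.reverse ++ [c]
        else if rv.reverse.getLast? = some c then rv.reverse.dropLast
        else rv.reverse ++ [c]) = (rstep rv c).reverse := by
      cases rv with
      | nil => simp [rstep]
      | cons a rt =>
        simp only [rstep]
        by_cases hac : a = c
        · simp [hac, List.getLast?_reverse]
        · have hh : ((a :: rt).head? = some c) = False := by simp [hac]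
          simp [List.getLast?_reverse, hac]
    simp only [List.foldl_cons, hstep, ih]

theorem rstep_chain {rv : List Char} (c : Char) (h : rv.IsChain (· ≠ ·)) :
    (rstep rv c).IsChain (· ≠ ·) := by
  unfold rstep
  split
  · exact h.tail
  · next hne =>
    cases rv with
    | nil => exact List.isChain_singleton c
    | cons a rt =>
      refine List.isChain_cons.mpr ⟨?_, h⟩
      intro y hy
      simp only [List.head?_cons, Option.mem_def, Option.some.injEq] at hy
      subst hy
      intro hca; exact hne (by simp [hca])

theorem rstep_rstep {rv : List Char} (c : Char) (h : rv.IsChain (· ≠ ·)) :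
    rstep (rstep rv c) c = rv := by
  unfold rstep
  cases rv with
  | nil => simp
  | cons a rt =>
    by_cases hac : a = c
    · subst hac
      simp only [List.head?_cons, List.tail_cons]
      cases rt with
      | nil => simp
      | cons b rt' =>
        have hab : a ≠ b := (List.isChain_cons.mp h).1 b (by simp)
        simp [Ne.symm hab]
    · simp [hac]

-- Deleting an adjacent equal pair does not change the rstep-fold result.
theorem rstep_splice (u : List Char) : ∀ (rv : List Char), rv.IsChain (· ≠ ·) →
    ∀ (c : Char) (v : List Char),
    (u ++ c :: c :: v).foldl rstep rv = (u ++ v).foldl rstep rv := by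
  induction u with
  | nil =>
    intro rv h c v
    simp [rstep_rstep c h]
  | cons a t ih =>
    intro rv h c v
    simpa using ih (rstep rv a) (rstep_chain a h) c v

-- On a pair-free list, the fold only pushes (given the head condition).
theorem rstep_pairfree (l : List Char) : ∀ (rv : List Char),
    l.IsChain (· ≠ ·) →
    (∀ a b, l.head? = some a → rv.head? = some b → a ≠ b) →
    l.foldl rstep rv = l.reverse ++ rv := by
  induction l with
  | nil => intro rv _ _; simp
  | cons c t ih =>
    intro rv hc hh
    have hpush : rstep rv c = c :: rv := by
      unfold rstep
      cases hr : rv.head? with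
      | none => simp
      | some b =>
        have hcb : c ≠ b := hh c b rfl hr
        have hsb : (some b = some c) = False := by
          simp; intro hbc; exact hcb hbc.symm
        simp [hsb]
    have hside : ∀ a b : Char, t.head? = some a → (c :: rv).head? = some b → a ≠ b := by
      intro a b ha hb
      have hb' : b = c := by simpa using hb.symm
      cases t with
      | nil => simp at ha
      | cons d t' =>
        have ha' : a = d := by simpa using ha.symm
        rw [ha', hb']
        exact Ne.symm ((List.isChain_cons.mp hc).1 d (by simp))
    rw [List.foldl_cons, hpush, ih (c :: rv) hc.tail hside]
    simp

-- take 1 of any list is trivially pair-free.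
theorem isChain_take_one (l : List Char) : (l.take 1).IsChain (· ≠ ·) := by
  cases l with
  | nil => exact List.isChain_nil
  | cons a t => simp

-- The loop preserves the rstep-fold result.
theorem loop_fold (chars : List Char) (i : Nat) :
    (solutionAltLoop chars i).foldl rstep [] = chars.foldl rstep [] := by
  fun_induction solutionAltLoop chars i with
  | case1 chars i h heq ih =>
    rw [ih]
    have hdecomp : chars = chars.take i ++ chars[i] :: chars[i+1] :: chars.drop (i + 2) := by
      conv_lhs => rw [← List.take_append_drop i chars]
      congr 1
      rw [List.drop_eq_getElem_cons (by omega)]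
      congr 1
      rw [List.drop_eq_getElem_cons (by omega)]
    conv_rhs => rw [hdecomp]
    rw [← heq, rstep_splice _ _ List.isChain_nil]
  | case2 chars i h hne ih => exact ih
  | case3 => rfl

-- The loop's result is pair-free, given that the scanned prefix is.
theorem loop_chain (chars : List Char) (i : Nat) :
    (chars.take (i + 1)).IsChain (· ≠ ·) → (solutionAltLoop chars i).IsChain (· ≠ ·) := by
  fun_induction solutionAltLoop chars i with
  | case1 chars i h heq ih =>
    intro hpre
    apply ih
    rcases Nat.eq_zero_or_pos i with hi | hi
    · subst hi
      exact isChain_take_one _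
    · have h1 : i - 1 + 1 = i := by omega
      rw [h1]
      have hlen : i ≤ (chars.take i).length := by simp; omega
      rw [List.take_append_of_le_length hlen, List.take_take]
      have h2 : min i i = i := by omega
      rw [h2]
      have h3 : min i (i + 1) = i := by omega
      have h4 := hpre.take i
      rwa [List.take_take, h3] at h4
  | case2 chars i h hne ih =>
    intro hpre
    apply ih
    rw [List.take_succ_eq_append_getElem (l := chars) (i := i + 1) (by omega)]
    refine List.isChain_append.mpr ⟨hpre, List.isChain_singleton _, ?_⟩
    intro x hx y hy
    simp only [List.head?_cons, Option.mem_def, Option.some.injEq] at hy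
    subst hy
    rw [List.take_succ_eq_append_getElem (l := chars) (i := i) (by omega)] at hx
    simp only [List.getLast?_concat, Option.mem_def, Option.some.injEq] at hx
    subst hx
    exact hne
  | case3 chars i h =>
    intro hpre
    rwa [List.take_of_length_le (by omega)] at hpre

theorem solution_eq (s : String) : solution s = solution_alt s := by
  have hA := foldA_eq_rstep s.toList []
  simp only [List.reverse_nil] at hA
  have hfold := loop_fold s.toList 0
  have hchain := loop_chain s.toList 0 (isChain_take_one _)
  have hpf := rstep_pairfree (solutionAltLoop s.toList 0) [] hchain (by simp)
  simp only [List.append_nil] at hpf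
  unfold solution solution_alt
  rw [hA, ← hfold, hpf, List.reverse_reverse]

-- ===== VERDICT (by name: the statement is the Claim_ definition above) =====
theorem solution_spec : Claim_equal_solution := by
  intro s _
  unfold Spec_solution
  exact solution_eq s
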